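-- pv_equiv track=rewrite | github.com/yinkeet/SanicValidator | chimera/mongo_helpers.py | create_sort_query
-- ===== SOURCE A (Python) =====
-- def create_sort_query(fields):
--     """Creates a sort query for mongo aggregation"""
--     results=[]
--     marker = set()
--
--     for field in fields:
--         lowercased_value = field.lower()
--         if lowercased_value not in marker:
--             marker.add(lowercased_value)
--             results.append(field)
--
--     return { (field.lower()):(1 if any(x.isupper() for x in field) else -1) for field in results }
-- ===== SOURCE B (Python) =====
-- def create_sort_query(fields):
--     """Creates a sort query for mongo aggregation"""
--     result = {}
--     rest = list(fields)
--     while rest: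
--         head = rest[0]
--         low = head.lower()
--         result[low] = 1 if any(x.isupper() for x in head) else -1
--         rest = [f for f in rest[1:] if f.lower() != low]
--     return result
-- ===== Notes on version B (the rewrite author's own statement) =====
-- stated objective: alternative
-- what changed: Replaces A's marker-set dedup pass plus dict comprehension with a select-and-filter loop: take the first remaining field, write its entry unconditionally (no membership test anywhere), then filter all case-insensitive duplicates out of the remaining list.
import Mathlib
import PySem

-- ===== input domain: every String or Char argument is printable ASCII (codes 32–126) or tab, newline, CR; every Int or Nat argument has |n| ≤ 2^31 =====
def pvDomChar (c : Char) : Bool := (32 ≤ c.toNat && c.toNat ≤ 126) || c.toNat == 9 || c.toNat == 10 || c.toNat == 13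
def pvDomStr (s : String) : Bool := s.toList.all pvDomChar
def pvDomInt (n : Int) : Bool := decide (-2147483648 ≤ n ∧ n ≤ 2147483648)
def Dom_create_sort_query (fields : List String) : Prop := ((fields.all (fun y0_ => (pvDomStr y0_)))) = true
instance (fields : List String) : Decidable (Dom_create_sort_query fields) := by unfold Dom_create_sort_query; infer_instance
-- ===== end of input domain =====

-- B replaces A's marker-set dedup pass + dict comprehension by a select-and-filter loop:
-- take the first remaining field, emit its entry unconditionally, and filter every
-- case-insensitive duplicate out of the remaining list (alternative decomposition, no membership tests).

-- ===== PORT A =====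
-- the final dict comprehension of A: { field.lower(): (1 if any upper else -1) for field in results }
def csqDictOf (results : List String) : PySem.Dict String Int :=
  results.foldl
    (fun d field =>
      d.insert (PySem.Str.lower field)
        (if field.toList.any (fun x => PySem.Chars.isupper x) then 1 else -1))
    PySem.Dict.empty

def create_sort_query (fields : List String) : List (String × Int) :=
  let st := fields.foldl
    (fun (st : List String × PySem.Set String) field =>
      let lowercased_value := PySem.Str.lower field
      if PySem.Set.contains st.2 lowercased_value then st
      else (st.1 ++ [field], PySem.Set.add st.2 lowercased_value))
    ([], PySem.Set.empty)
  (csqDictOf st.1).items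

-- ===== PORT B =====
-- B's while loop: head = rest[0]; result[head.lower()] = ±1; rest = [f for f in rest[1:] if f.lower() != head.lower()]
def csqAltLoop : List String → PySem.Dict String Int → PySem.Dict String Int
  | [], result => result
  | head :: tail, result =>
    let low := PySem.Str.lower head
    csqAltLoop (tail.filter (fun f => PySem.Str.lower f != low))
      (result.insert low (if head.toList.any (fun x => PySem.Chars.isupper x) then 1 else -1))
termination_by rest _ => rest.length
decreasing_by
  simp only [List.unattach_filter, List.unattach_attach]
  exact Nat.lt_succ_of_le (List.length_filter_le _ _)

def create_sort_query_alt (fields : List String) : List (String × Int) :=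
  (csqAltLoop fields PySem.Dict.empty).items

-- ===== PRECONDITION & SPEC =====
def Spec_create_sort_query (fields : List String) (out : List (String × Int)) : Prop := out = create_sort_query_alt fields
instance (fields : List String) (out : List (String × Int)) : Decidable (Spec_create_sort_query fields out) := by unfold Spec_create_sort_query; infer_instance

-- ===== CLAIM (what is proved, stated in full; the proofs are below) =====
def Claim_equal_create_sort_query : Prop := ∀ (fields : List String), Dom_create_sort_query fields → Spec_create_sort_query fields (create_sort_query fields)

-- ===== LEMMAS AND PROOFS =====

-- keep-first case-insensitive dedup, phrased as B's select-and-filter recursion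
def dedupLow : List String → List String
  | [] => []
  | h :: t => h :: dedupLow (t.filter (fun f => PySem.Str.lower f != PySem.Str.lower h))
termination_by l => l.length
decreasing_by
  simp only [List.unattach_filter, List.unattach_attach]
  exact Nat.lt_succ_of_le (List.length_filter_le _ _)

lemma dedupLow_cons (h : String) (t : List String) :
    dedupLow (h :: t) = h :: dedupLow (t.filter (fun f => PySem.Str.lower f != PySem.Str.lower h)) := by
  rw [dedupLow]

lemma mem_dedupLow {x : String} : ∀ {l : List String}, x ∈ dedupLow l → x ∈ l := by
  intro l
  induction l using dedupLow.induct with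
  | case1 => intro h; exact absurd h (by simp [dedupLow])
  | case2 h t ih =>
    intro hx
    rw [dedupLow] at hx
    simp only [List.unattach_filter, List.unattach_attach] at ih
    rcases List.mem_cons.mp hx with rfl | hx
    · exact List.mem_cons_self
    · exact List.mem_cons_of_mem _ (List.mem_of_mem_filter (ih hx))

lemma nodup_map_lower_dedupLow : ∀ (l : List String),
    ((dedupLow l).map PySem.Str.lower).Nodup := by
  intro l
  induction l using dedupLow.induct with
  | case1 => simp [dedupLow]
  | case2 h t ih =>
    rw [dedupLow]
    simp only [List.unattach_filter, List.unattach_attach] at ih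
    simp only [List.map_cons, List.nodup_cons]
    refine ⟨?_, ih⟩
    intro hmem
    rcases List.mem_map.mp hmem with ⟨f, hf, hlf⟩
    have := List.of_mem_filter (mem_dedupLow hf)
    simp only [bne_iff_ne, ne_eq] at this
    exact this hlf

-- A's dedup loop computes dedupLow, generalized over the accumulator and marker
lemma a_fold_eq_dedupLow : ∀ (fields : List String) (acc : List String) (m : PySem.Set String),
    (fields.foldl
      (fun (st : List String × PySem.Set String) field =>
        let lowercased_value := PySem.Str.lower field
        if PySem.Set.contains st.2 lowercased_value then st
        else (st.1 ++ [field], PySem.Set.add st.2 lowercased_value))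
      (acc, m)).1
    = acc ++ dedupLow (fields.filter (fun f => !(PySem.Set.contains m (PySem.Str.lower f)))) := by
  intro fields
  induction fields with
  | nil => intro acc m; simp [dedupLow]
  | cons h t ih =>
    intro acc m
    simp only [List.foldl_cons, List.filter_cons]
    by_cases hc : PySem.Set.contains m (PySem.Str.lower h) = true
    · rw [if_pos hc]
      simp only [hc, Bool.not_true, if_neg (by simp : ¬ (false = true))]
      exact ih acc m
    · have hc' : PySem.Set.contains m (PySem.Str.lower h) = false := Bool.eq_false_iff.mpr hc
      rw [if_neg hc, ih (acc ++ [h]) (PySem.Set.add m (PySem.Str.lower h)),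
        if_pos (show (!PySem.Set.contains m (PySem.Str.lower h)) = true by rw [hc']; rfl),
        dedupLow_cons, List.filter_filter, List.append_assoc, List.cons_append, List.nil_append]
      congr 2
      apply congrArg
      apply List.filter_congr
      intro f _
      have hnm : PySem.Str.lower h ∉ m := by
        intro hm
        rw [PySem.Set.contains_eq_listContains] at hc'
        simp [hm] at hc'
      have hadd : PySem.Set.add m (PySem.Str.lower h) = m ++ [PySem.Str.lower h] := by
        simp [PySem.Set.add, hnm]
      rw [hadd]
      simp only [PySem.Set.contains_eq_listContains, List.contains_append]
      by_cases he : PySem.Str.lower f = PySem.Str.lower h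
      · simp [he]
      · simp only [PySem.Set.contains_eq_listContains] at hc' ⊢
        simp [he]

-- B's loop appends one entry per dedupLow element, for any dict with fresh keys
lemma csqAltLoop_items : ∀ (l : List String) (d : PySem.Dict String Int),
    (∀ f ∈ l, d.contains (PySem.Str.lower f) = false) →
    (csqAltLoop l d).items
      = d.items ++ (dedupLow l).map
          (fun f => (PySem.Str.lower f,
            (if f.toList.any (fun x => PySem.Chars.isupper x) then (1 : Int) else -1))) := by
  intro l
  induction l using dedupLow.induct with
  | case1 => intro d _; simp [csqAltLoop, dedupLow]
  | case2 h t ih =>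
    intro d hfresh
    simp only [List.unattach_filter, List.unattach_attach] at ih
    rw [csqAltLoop, dedupLow]
    have hfh : d.contains (PySem.Str.lower h) = false := hfresh h List.mem_cons_self
    rw [ih]
    · simp [PySem.Dict.items_insert, hfh, List.append_assoc]
    · intro f hf
      have hne : PySem.Str.lower f ≠ PySem.Str.lower h := by
        have := List.of_mem_filter hf
        simpa using this
      rw [PySem.Dict.contains_insert]
      simp only [beq_eq_false_iff_ne, Bool.or_eq_false_iff]
      exact ⟨by simpa using hne, hfresh f (List.mem_cons_of_mem _ (List.mem_of_mem_filter hf))⟩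

-- ===== VERDICT (by name: the statement is the Claim_ definition above) =====
theorem create_sort_query_spec : Claim_equal_create_sort_query := by
  intro fields _
  unfold Spec_create_sort_query create_sort_query create_sort_query_alt
  show (csqDictOf (List.foldl
      (fun (st : List String × PySem.Set String) field =>
        let lowercased_value := PySem.Str.lower field
        if PySem.Set.contains st.2 lowercased_value then st
        else (st.1 ++ [field], PySem.Set.add st.2 lowercased_value))
      ([], PySem.Set.empty) fields).1).items = (csqAltLoop fields PySem.Dict.empty).items
  have hA := a_fold_eq_dedupLow fields [] PySem.Set.empty
  have hfilter : fields.filter (fun f => !(PySem.Set.contains PySem.Set.empty (PySem.Str.lower f))) = fields := by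
    apply List.filter_eq_self.mpr
    intro f _
    simp [PySem.Set.contains_eq_listContains, PySem.Set.empty]
  rw [hfilter, List.nil_append] at hA
  rw [hA]
  have hB := csqAltLoop_items fields PySem.Dict.empty (by
    intro f _; simp [PySem.Dict.contains_empty])
  rw [hB]
  unfold csqDictOf
  rw [PySem.Dict.items_foldl_insert_fresh (dedupLow fields)
    (fun f => PySem.Str.lower f)
    (fun f => (if f.toList.any (fun x => PySem.Chars.isupper x) then (1 : Int) else -1))
    PySem.Dict.empty
    (by intro a _; simp [PySem.Dict.contains_empty])
    (nodup_map_lower_dedupLow fields)]
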